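-- pv_equiv track=rewrite | github.com/seed-atara/MCSA | mcsa/synthesis.py | _group_reports
-- ===== SOURCE A (Python) =====
-- def _group_reports(reports: list[dict]) -> str:
--     """Group reports by agency and module for the synthesis prompt."""
--     if not reports:
--         return "(No reports found in the last 7 days.)"
--
--     # Group by agency
--     by_agency: dict[str, list[dict]] = {}
--     for r in reports:
--         agency = r.get("agency_name", "Unknown")
--         by_agency.setdefault(agency, []).append(r)
--
--     sections = []
--     for agency, agency_reports in sorted(by_agency.items()):
--         agency_section = f"# {agency}\n"
--         for r in agency_reports:
--             module = r.get("module", "unknown")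
--             cadence = r.get("cadence", "")
--             created = r.get("created_at", "")[:10]
--             content = r.get("content", "")
--             # Cap each report to avoid token bloat
--             if len(content) > 3000:
--                 content = content[:3000] + "\n...(truncated)"
--             agency_section += f"\n## {module} ({cadence}, {created})\n{content}\n"
--         sections.append(agency_section)
--
--     return "\n\n---\n\n".join(sections)
-- ===== SOURCE B (Python) =====
-- def _group_reports(reports: list[dict]) -> str:
--     """Group reports by agency and module for the synthesis prompt."""
--     if not reports:
--         return "(No reports found in the last 7 days.)"
--
--     def fmt(r):
--         module = r.get("module", "unknown")
--         cadence = r.get("cadence", "")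
--         created = r.get("created_at", "")[:10]
--         content = r.get("content", "")
--         if len(content) > 3000:
--             content = content[:3000] + "\n...(truncated)"
--         return f"\n## {module} ({cadence}, {created})\n{content}\n"
--
--     agencies = sorted({r.get("agency_name", "Unknown") for r in reports})
--     sections = [
--         f"# {a}\n"
--         + "".join(fmt(r) for r in reports if r.get("agency_name", "Unknown") == a)
--         for a in agencies
--     ]
--     return "\n\n---\n\n".join(sections)
-- ===== Notes on version B (the rewrite author's own statement) =====
-- stated objective: idiomatic
-- what changed: Replaces the mutable dict accumulation + sorted(items) with a sorted set of distinct agencies and a per-agency filter comprehension, formatting each report via a helper and ''.join instead of += accumulation.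
import Mathlib
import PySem

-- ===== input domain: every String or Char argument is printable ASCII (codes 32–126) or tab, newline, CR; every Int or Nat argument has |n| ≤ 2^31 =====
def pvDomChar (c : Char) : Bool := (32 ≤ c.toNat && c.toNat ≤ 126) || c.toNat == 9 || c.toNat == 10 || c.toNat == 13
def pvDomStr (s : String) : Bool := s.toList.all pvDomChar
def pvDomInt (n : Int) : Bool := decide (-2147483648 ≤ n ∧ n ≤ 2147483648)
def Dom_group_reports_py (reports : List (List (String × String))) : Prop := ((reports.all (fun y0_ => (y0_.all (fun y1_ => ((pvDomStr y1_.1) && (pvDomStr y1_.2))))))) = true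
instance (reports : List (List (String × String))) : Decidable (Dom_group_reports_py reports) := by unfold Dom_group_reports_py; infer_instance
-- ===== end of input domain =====

-- B replaces A's dict-accumulation by "sorted distinct agencies, then filter per agency" (idiomatic set/comprehension style); same output proved.


-- shared port of `r.get(k, default)` on a report dict
def pvGet (r : List (String × String)) (k dflt : String) : String :=
  (PySem.Dict.mk r).getD k dflt

-- ===== PORT A =====
def group_reports_py (reports : List (List (String × String))) : String :=
  if reports = [] then "(No reports found in the last 7 days.)"
  else
    let by_agency : PySem.Dict String (List (List (String × String))) :=
      reports.foldl (fun d r =>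
        d.modify (pvGet r "agency_name" "Unknown") [] (fun l => l ++ [r])) PySem.Dict.empty
    -- sorted(by_agency.items()): dict keys are distinct, so Python's tuple comparison
    -- is decided by the first component alone; ported as a sort keyed on it
    let sections : List String :=
      (PySem.List.sorted by_agency.items (fun p => p.1)).foldl (fun secs p =>
        let agency_section :=
          p.2.foldl (fun acc r =>
            let module := pvGet r "module" "unknown"
            let cadence := pvGet r "cadence" ""
            let created := PySem.Str.slice (pvGet r "created_at" "") none (some 10)
            let content := pvGet r "content" ""
            let content := if PySem.Str.len content > 3000
              then PySem.Str.slice content none (some 3000) ++ "\n...(truncated)"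
              else content
            acc ++ ("\n## " ++ module ++ " (" ++ cadence ++ ", " ++ created ++ ")\n" ++ content ++ "\n"))
            ("# " ++ p.1 ++ "\n")
        secs ++ [agency_section]) []
    PySem.Str.join "\n\n---\n\n" sections

-- ===== PORT B =====
def pvFmt (r : List (String × String)) : String :=
  let module := pvGet r "module" "unknown"
  let cadence := pvGet r "cadence" ""
  let created := PySem.Str.slice (pvGet r "created_at" "") none (some 10)
  let content := pvGet r "content" ""
  let content := if PySem.Str.len content > 3000
    then PySem.Str.slice content none (some 3000) ++ "\n...(truncated)"
    else content
  "\n## " ++ module ++ " (" ++ cadence ++ ", " ++ created ++ ")\n" ++ content ++ "\n"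

def group_reports_py_alt (reports : List (List (String × String))) : String :=
  if reports = [] then "(No reports found in the last 7 days.)"
  else
    let agencies : List String :=
      PySem.List.sorted
        (PySem.Set.ofList (reports.map (fun r => pvGet r "agency_name" "Unknown")))
        (fun a => a)
    let sections : List String :=
      agencies.map (fun a =>
        "# " ++ a ++ "\n" ++
          PySem.Str.join ""
            ((reports.filter (fun r => pvGet r "agency_name" "Unknown" == a)).map pvFmt))
    PySem.Str.join "\n\n---\n\n" sections

-- ===== PRECONDITION & SPEC =====
def Spec_group_reports_py (reports : List (List (String × String))) (out : String) : Prop := out = group_reports_py_alt reports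
instance (reports : List (List (String × String))) (out : String) : Decidable (Spec_group_reports_py reports out) := by unfold Spec_group_reports_py; infer_instance

-- ===== CLAIM (what is proved, stated in full; the proofs are below) =====
def Claim_equal_group_reports_py : Prop := ∀ (reports : List (List (String × String))), Dom_group_reports_py reports → Spec_group_reports_py reports (group_reports_py reports)

-- ===== LEMMAS AND PROOFS =====

-- ''.join over a cons
theorem pv_join_empty_cons (x : String) (xs : List String) :
    PySem.Str.join "" (x :: xs) = x ++ PySem.Str.join "" xs := by
  cases xs with
  | nil => simp [PySem.Str.join, PySem.Chars.join_singleton, PySem.Chars.join_nil]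
  | cons y ys => simp [PySem.Str.join, PySem.Chars.join_cons_cons]

-- A's `+=` accumulation equals init ++ ''.join(map fmt)
theorem pv_foldl_append_eq_join (rs : List (List (String × String))) (init : String) :
    rs.foldl (fun acc r => acc ++ pvFmt r) init
      = init ++ PySem.Str.join "" (rs.map pvFmt) := by
  induction rs generalizing init with
  | nil => simp [PySem.Str.join, PySem.Chars.join_nil]
  | cons r rs ih =>
      simp only [List.foldl_cons, List.map_cons, ih, pv_join_empty_cons]
      simp [String.append_assoc]

-- A's `sections.append(...)` loop equals a map
theorem pv_foldl_sections {α : Type} (l : List α) (h : α → String) (init : List String) :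
    l.foldl (fun secs p => secs ++ [h p]) init = init ++ l.map h := by
  induction l generalizing init with
  | nil => simp
  | cons x xs ih => simp [ih]

-- the grouping dict: value at any key c is the filtered report list
theorem pv_getD_by_agency (reports : List (List (String × String))) (c : String) :
    (reports.foldl (fun d r =>
        d.modify (pvGet r "agency_name" "Unknown") [] (fun l => l ++ [r]))
        PySem.Dict.empty).getD c []
      = reports.filter (fun r => pvGet r "agency_name" "Unknown" == c) := by
  have h := PySem.Dict.getD_foldl_modify_append
      (reports.map (fun r => (pvGet r "agency_name" "Unknown", r)))
      (PySem.Dict.empty : PySem.Dict String (List (List (String × String)))) c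
  rw [List.foldl_map] at h
  simpa [PySem.Dict.getD_empty, List.filter_map, Function.comp_def] using h

-- the grouping dict: keys are the distinct agencies in first-occurrence order
theorem pv_keys_by_agency (reports : List (List (String × String))) :
    (reports.foldl (fun d r =>
        d.modify (pvGet r "agency_name" "Unknown") [] (fun l => l ++ [r]))
        PySem.Dict.empty).keys
      = PySem.Set.ofList (reports.map (fun r => pvGet r "agency_name" "Unknown")) := by
  have h := PySem.Dict.keys_foldl_modify_key reports
      (fun r => pvGet r "agency_name" "Unknown") ([] : List (List (String × String)))
      (fun _ r l => l ++ [r]) PySem.Dict.empty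
  rw [h, PySem.Dict.keys_empty, PySem.Set.ofList_eq_foldl]
  rfl

theorem pv_nodup_keys_by_agency (reports : List (List (String × String))) :
    (reports.foldl (fun d r =>
        d.modify (pvGet r "agency_name" "Unknown") [] (fun l => l ++ [r]))
        PySem.Dict.empty).keys.Nodup := by
  exact PySem.Dict.nodup_keys_foldl_modify_key reports
      (fun r => pvGet r "agency_name" "Unknown") ([] : List (List (String × String)))
      (fun _ r l => l ++ [r]) PySem.Dict.empty
      (by rw [PySem.Dict.keys_empty]; exact List.nodup_nil)

-- A's sorted dict items are B's sorted agencies paired with their filtered reports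
theorem pv_sorted_items (reports : List (List (String × String))) :
    PySem.List.sorted
        (reports.foldl (fun d r =>
            d.modify (pvGet r "agency_name" "Unknown") [] (fun l => l ++ [r]))
            PySem.Dict.empty).items (fun p => p.1)
      = (PySem.List.sorted
            (PySem.Set.ofList (reports.map (fun r => pvGet r "agency_name" "Unknown")))
            (fun a => a)).map
          (fun a => (a, reports.filter (fun r => pvGet r "agency_name" "Unknown" == a))) := by
  set d := reports.foldl (fun d r =>
      d.modify (pvGet r "agency_name" "Unknown") [] (fun l => l ++ [r])) PySem.Dict.empty with hd
  have hkeys := pv_keys_by_agency reports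
  have hnodup := pv_nodup_keys_by_agency reports
  apply PySem.List.sorted_eq_of_perm_of_pairwise_lt
  · -- permutation
    have hitems : d.items = d.keys.map (fun k => (k, d.getD k [])) :=
      PySem.Dict.items_eq_map_keys d hnodup []
    have hval : (fun k => (k, d.getD k []))
        = fun a => (a, reports.filter (fun r => pvGet r "agency_name" "Unknown" == a)) := by
      funext a; rw [hd, pv_getD_by_agency]
    rw [hitems, hval, ← hkeys]
    exact (PySem.List.sorted_perm d.keys (fun a => a) false).map _
  · -- strictly increasing first components
    rw [List.pairwise_map]
    exact PySem.List.sorted_ofList_pairwise_lt _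

-- ===== VERDICT (by name: the statement is the Claim_ definition above) =====
theorem group_reports_py_spec : Claim_equal_group_reports_py := by
  intro reports _
  unfold Spec_group_reports_py group_reports_py group_reports_py_alt
  by_cases h : reports = []
  · simp [h]
  · simp only [if_neg h]
    rw [pv_sorted_items]
    congr 1
    rw [pv_foldl_sections, List.map_map, List.nil_append]
    apply List.map_congr_left
    intro a _
    show (reports.filter (fun r => pvGet r "agency_name" "Unknown" == a)).foldl
        (fun acc r => acc ++ pvFmt r) ("# " ++ a ++ "\n") = _
    rw [pv_foldl_append_eq_join]
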